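-- pv_equiv track=rewrite | github.com/0XDE57/scales | music.py | get_mode_of_scale
-- ===== SOURCE A (Python) =====
-- notes = ['C', 'C#', 'D', 'D#', 'E', 'F', 'F#', 'G', 'G#', 'A', 'A#', 'B']
--
-- def get_mode_of_scale(key_signature, mode_intervals):
--     new_scale = []
--     note = notes.index(key_signature.upper())
--     for x in range(len(mode_intervals)):
--         offset = mode_intervals[x % len(mode_intervals)]
--         new_scale.append(notes[note % len(notes)])
--         note += offset
--
--     return new_scale
-- ===== SOURCE B (Python) =====
-- notes = ['C', 'C#', 'D', 'D#', 'E', 'F', 'F#', 'G', 'G#', 'A', 'A#', 'B']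
--
-- def get_mode_of_scale(key_signature, mode_intervals):
--     note = notes.index(key_signature.upper())
--     if not mode_intervals:
--         return []
--     positions = [note]
--     for offset in mode_intervals[:-1]:
--         positions.append(positions[-1] + offset)
--     return [notes[p % 12] for p in positions]
-- ===== Notes on version B (the rewrite author's own statement) =====
-- stated objective: alternative
-- what changed: B replaces A's single interleaved loop (which mutates a running note index and appends a name per range(len) step with the redundant x % len index) by two separate passes: first build the absolute note positions as a prefix-sum table over mode_intervals[:-1], then map each position to its note name in a comprehension.
import Mathlib
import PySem

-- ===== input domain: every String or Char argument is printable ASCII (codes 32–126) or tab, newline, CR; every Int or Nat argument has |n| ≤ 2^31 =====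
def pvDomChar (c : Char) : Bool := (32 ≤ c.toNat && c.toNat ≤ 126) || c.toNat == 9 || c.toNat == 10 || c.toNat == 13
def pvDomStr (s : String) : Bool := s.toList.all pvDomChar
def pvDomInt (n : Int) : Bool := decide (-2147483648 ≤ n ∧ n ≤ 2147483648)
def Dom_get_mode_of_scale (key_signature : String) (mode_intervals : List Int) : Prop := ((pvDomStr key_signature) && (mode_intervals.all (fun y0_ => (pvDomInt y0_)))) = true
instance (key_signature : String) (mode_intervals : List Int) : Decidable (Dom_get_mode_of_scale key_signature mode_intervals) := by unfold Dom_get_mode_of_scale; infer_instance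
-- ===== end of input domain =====

-- B builds the note positions as a prefix-sum table and then maps them to names in a
-- second pass, instead of A's single loop mutating a running index (objective: alternative).

-- ===== PORT A =====
def pyNotes : List String :=
  ["C", "C#", "D", "D#", "E", "F", "F#", "G", "G#", "A", "A#", "B"]

def get_mode_of_scale (key_signature : String) (mode_intervals : List Int) : List String :=
  -- notes.index(key_signature.upper()); none = ValueError, excluded by Pre_
  match PySem.List.index? pyNotes (PySem.Str.upper key_signature) with
  | none => []
  | some note0 =>
    let st :=
      (PySem.List.pyRange 0 (mode_intervals.length : Int) 1).foldl
        (fun (s : Int × List String) x =>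
          -- offset = mode_intervals[x % len(mode_intervals)]; index always in range
          let offset := PySem.List.pyGetD mode_intervals
            (PySem.Int.mod x (mode_intervals.length : Int)) 0
          -- new_scale.append(notes[note % len(notes)]); index always in range
          let acc := s.2 ++ [PySem.List.pyGetD pyNotes
            (PySem.Int.mod s.1 (pyNotes.length : Int)) ""]
          (s.1 + offset, acc))
        ((note0 : Int), [])
    st.2

-- ===== PORT B =====
def get_mode_of_scale_alt (key_signature : String) (mode_intervals : List Int) : List String :=
  match PySem.List.index? pyNotes (PySem.Str.upper key_signature) with
  | none => []
  | some note0 =>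
    if mode_intervals = [] then []
    else
      -- positions = prefix sums over mode_intervals[:-1], seeded with the key's index
      let positions :=
        (PySem.List.slice mode_intervals none (some (-1))).foldl
          (fun ps off => ps ++ [PySem.List.pyGetD ps (-1) 0 + off])
          [(note0 : Int)]
      positions.map (fun p => PySem.List.pyGetD pyNotes (PySem.Int.mod p 12) "")

-- ===== PRECONDITION & SPEC =====
-- Pre_ excludes exactly the inputs where A raises ValueError (key_signature.upper() is not
-- a note name); B raises there too.
def Pre_get_mode_of_scale (key_signature : String) (mode_intervals : List Int) : Prop :=
  PySem.Str.upper key_signature ∈ pyNotes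
instance (key_signature : String) (mode_intervals : List Int) : Decidable (Pre_get_mode_of_scale key_signature mode_intervals) := by unfold Pre_get_mode_of_scale; infer_instance

def pvWitness_get_mode_of_scale : String × List Int := ("c", [2, 2, 1, 2, 2, 2, 1])

def Spec_get_mode_of_scale (key_signature : String) (mode_intervals : List Int) (out : List String) : Prop := out = get_mode_of_scale_alt key_signature mode_intervals
instance (key_signature : String) (mode_intervals : List Int) (out : List String) : Decidable (Spec_get_mode_of_scale key_signature mode_intervals out) := by unfold Spec_get_mode_of_scale; infer_instance

-- ===== CLAIM (what is proved, stated in full; the proofs are below) =====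
def Claim_equal_get_mode_of_scale : Prop := ∀ (key_signature : String) (mode_intervals : List Int), Dom_get_mode_of_scale key_signature mode_intervals → Pre_get_mode_of_scale key_signature mode_intervals → Spec_get_mode_of_scale key_signature mode_intervals (get_mode_of_scale key_signature mode_intervals)

-- ===== LEMMAS AND PROOFS =====

-- note name at absolute position p
def pvName (p : Int) : String := PySem.List.pyGetD pyNotes (PySem.Int.mod p 12) ""

-- reference recursion: A's loop, structurally over the interval list
def pvScale : List Int → Int → List String
  | [], _ => []
  | o :: rest, note => pvName note :: pvScale rest (note + o)

-- tail of the prefix-sum table, structurally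
def pvPosFrom : List Int → Int → List Int
  | [], _ => []
  | o :: rest, last => (last + o) :: pvPosFrom rest (last + o)

-- A's structural fold computes pvScale
theorem pvFoldA_eq (mi : List Int) : ∀ (note : Int) (acc : List String),
    (mi.foldl (fun (s : Int × List String) off => (s.1 + off, s.2 ++ [pvName s.1]))
      (note, acc)).2 = acc ++ pvScale mi note := by
  induction mi with
  | nil => intro note acc; simp [pvScale]
  | cons o rest ih => intro note acc; simp [pvScale, ih (note + o) (acc ++ [pvName note])]

-- B's position-building fold computes pvPosFrom
theorem pvFoldB_eq (l : List Int) : ∀ (ps : List Int) (h : ps ≠ []),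
    l.foldl (fun ps off => ps ++ [PySem.List.pyGetD ps (-1) 0 + off]) ps
      = ps ++ pvPosFrom l (ps.getLast h) := by
  induction l with
  | nil => intro ps h; simp [pvPosFrom]
  | cons o rest ih =>
    intro ps h
    have hne : ps ++ [ps.getLast h + o] ≠ [] := by simp
    simp only [List.foldl_cons, PySem.List.pyGetD_neg_one ps 0 h,
      ih (ps ++ [ps.getLast h + o]) hne, List.getLast_append_singleton]
    simp [pvPosFrom]

-- pvScale on a nonempty list is the name map over the prefix-sum positions
theorem pvScale_eq_map (mi : List Int) : ∀ (note : Int), mi ≠ [] →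
    pvScale mi note = pvName note :: (pvPosFrom mi.dropLast note).map pvName := by
  induction mi with
  | nil => intro note h; exact absurd rfl h
  | cons o rest ih =>
    intro note _
    cases rest with
    | nil => simp [pvScale, pvPosFrom]
    | cons o' rest' =>
      conv_lhs => rw [pvScale]
      rw [ih (note + o) (by simp)]
      simp [pvPosFrom, List.dropLast_cons₂]

theorem get_mode_of_scale_spec : Claim_equal_get_mode_of_scale := by
  intro key mi _hdom hpre
  unfold Spec_get_mode_of_scale get_mode_of_scale get_mode_of_scale_alt
  obtain ⟨k, hk⟩ := Option.isSome_iff_exists.mp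
    ((PySem.List.index?_isSome_iff pyNotes (PySem.Str.upper key)).mpr hpre)
  rw [hk]
  simp only
  by_cases hmi : mi = []
  · subst hmi; simp [PySem.List.pyRange_one_eq_nil]
  · rw [if_neg hmi]
    -- A side: the x % len index is just x, then the range-fold is a fold over mi
    have hlen : (0 : Int) < (mi.length : Int) := by
      have := List.length_pos_iff.mpr hmi; exact_mod_cast this
    have hcongr := PySem.List.foldl_congr_mem
      (l := PySem.List.pyRange 0 (mi.length : Int) 1)
      (init := ((k : Int), ([] : List String)))
      (f := fun (s : Int × List String) x =>
        (s.1 + PySem.List.pyGetD mi (PySem.Int.mod x (mi.length : Int)) 0,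
         s.2 ++ [PySem.List.pyGetD pyNotes (PySem.Int.mod s.1 (pyNotes.length : Int)) ""]))
      (g := fun (s : Int × List String) x =>
        (fun (s : Int × List String) off => (s.1 + off, s.2 ++ [pvName s.1])) s
          (PySem.List.pyGetD mi x 0))
      (by
        intro acc x hx
        have hx' := (PySem.List.mem_pyRange_one).mp hx
        have hmod : PySem.Int.mod x (mi.length : Int) = x := by
          rw [PySem.Int.mod_eq_emod_of_pos hlen]
          exact Int.emod_eq_of_lt hx'.1 hx'.2
        simp [hmod, pvName, pyNotes])
    rw [hcongr, PySem.List.foldl_pyRange_zero_pyGetD' mi 0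
      (fun (s : Int × List String) off => (s.1 + off, s.2 ++ [pvName s.1])) ((k : Int), []),
      pvFoldA_eq mi (k : Int) []]
    -- B side
    rw [PySem.List.slice_to_neg_one,
      pvFoldB_eq mi.dropLast [(k : Int)] (by simp), pvScale_eq_map mi _ hmi]
    simp [pvName]
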